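-- pv_equiv track=rewrite | github.com/andela-angene/Algorithmic-Problem-Solving | Hackerrank/algorithms/implementation/electric-shop.py | electric
-- ===== SOURCE A (Python) =====
-- import bisect
--
-- def electric(N, M, s):
--     N.sort()
--     M.sort()
--     result = -1
--     for i in M:
--         location = bisect.bisect_right(N, s - i)
--         if location == 0:
--             return result
--         else:
--             result = max(result, i + N[location - 1])
--     return result
-- ===== SOURCE B (Python) =====
-- def electric(N, M, s):
--     # Two-pointer sweep over both sorted lists (sorts in place, as A does).
--     N.sort()
--     M.sort()
--     best = -1
--     i, j = 0, len(M) - 1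
--     while i < len(N) and j >= 0:
--         t = N[i] + M[j]
--         if t <= s:
--             best = max(best, t)
--             i += 1
--         else:
--             j -= 1
--     return best
-- ===== Notes on version B (the rewrite author's own statement) =====
-- stated objective: alternative
-- what changed: Replaces the per-drive binary search (bisect_right with early return) over the sorted keyboard list by a single linear two-pointer sweep over both sorted lists.
import Mathlib
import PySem

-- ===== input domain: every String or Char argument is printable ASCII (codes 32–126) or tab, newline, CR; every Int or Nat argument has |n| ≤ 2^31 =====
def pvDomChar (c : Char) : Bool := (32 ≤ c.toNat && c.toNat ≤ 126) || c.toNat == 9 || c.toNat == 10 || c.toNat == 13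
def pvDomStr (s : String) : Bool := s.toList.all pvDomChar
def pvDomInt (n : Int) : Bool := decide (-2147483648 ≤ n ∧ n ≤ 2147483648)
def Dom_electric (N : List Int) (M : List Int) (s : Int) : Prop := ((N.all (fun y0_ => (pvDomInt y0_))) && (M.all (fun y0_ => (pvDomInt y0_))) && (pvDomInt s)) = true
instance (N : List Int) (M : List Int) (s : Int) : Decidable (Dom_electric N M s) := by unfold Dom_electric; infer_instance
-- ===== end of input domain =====

-- ===== PORT A =====
-- B changes: replaces the per-drive bisect_right search (with early return) by a two-pointer sweep over both sorted lists.
-- Side effect note: both Pythons sort their arguments N and M in place; the equivalence proved here is about the return value.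

-- Python `for i in M: ... return result` loop with its early return, over the sorted lists
def electricLoop (Ns : List Int) (s : Int) : List Int → Int → Int
  | [], result => result
  | i :: rest, result =>
    let location := PySem.List.bisectRight Ns (s - i)
    if location = 0 then result
    else
      -- N[location-1]; the index is always in range (1 ≤ location ≤ len Ns), so getD 0 never fires
      electricLoop Ns s rest (max result (i + ((PySem.List.pyGet? Ns ((location : Int) - 1)).getD 0)))

def electric (N : List Int) (M : List Int) (s : Int) : Int :=
  electricLoop (PySem.List.sorted N (fun x => x)) s (PySem.List.sorted M (fun x => x)) (-1)

-- ===== PORT B =====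
-- the while loop; j stays < Ms.length, so M[j] (pyGet?) never fires its default
def tpLoop (Ns Ms : List Int) (s : Int) (i : Nat) (j : Int) (best : Int) : Int :=
  if h : i < Ns.length ∧ 0 ≤ j then
    let t := Ns.getD i 0 + (PySem.List.pyGet? Ms j).getD 0
    if t ≤ s then tpLoop Ns Ms s (i + 1) j (max best t)
    else tpLoop Ns Ms s i (j - 1) best
  else best
termination_by (Ns.length - i) + (j + 1).toNat
decreasing_by
  · omega
  · omega

def electric_alt (N : List Int) (M : List Int) (s : Int) : Int :=
  let Ns := PySem.List.sorted N (fun x => x)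
  let Ms := PySem.List.sorted M (fun x => x)
  tpLoop Ns Ms s 0 ((Ms.length : Int) - 1) (-1)

-- ===== PRECONDITION & SPEC =====
def Spec_electric (N : List Int) (M : List Int) (s : Int) (out : Int) : Prop := out = electric_alt N M s
instance (N : List Int) (M : List Int) (s : Int) (out : Int) : Decidable (Spec_electric N M s out) := by unfold Spec_electric; infer_instance

-- ===== CLAIM (what is proved, stated in full; the proofs are below) =====
def Claim_equal_electric : Prop := ∀ (N : List Int) (M : List Int) (s : Int), Dom_electric N M s → Spec_electric N M s (electric N M s)

-- ===== LEMMAS AND PROOFS =====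

-- "r is the maximum of -1 and all pair sums n+m ≤ s": both programs compute the unique such value
def GoodMax (N M : List Int) (s r : Int) : Prop :=
  (-1 ≤ r) ∧ (r = -1 ∨ ∃ n ∈ N, ∃ m ∈ M, n + m = r ∧ r ≤ s) ∧
  (∀ n ∈ N, ∀ m ∈ M, n + m ≤ s → n + m ≤ r)

theorem goodMax_unique {N M : List Int} {s r r' : Int}
    (h : GoodMax N M s r) (h' : GoodMax N M s r') : r = r' := by
  obtain ⟨hb, hw, hu⟩ := h
  obtain ⟨hb', hw', hu'⟩ := h'
  apply le_antisymm
  · rcases hw with rfl | ⟨n, hn, m, hm, rfl, hs⟩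
    · exact hb'
    · exact hu' n hn m hm hs
  · rcases hw' with rfl | ⟨n, hn, m, hm, rfl, hs⟩
    · exact hb
    · exact hu n hn m hm hs

theorem tpLoop_good (Ns Ms : List Int) (s : Int)
    (hNs : List.Pairwise (· ≤ ·) Ns) (hMs : List.Pairwise (· ≤ ·) Ms) :
    ∀ (i : Nat) (j best : Int),
    j < (Ms.length : Int) →
    -1 ≤ best →
    (best = -1 ∨ ∃ n ∈ Ns, ∃ m ∈ Ms, n + m = best ∧ best ≤ s) →
    (∀ (a b : Nat) (ha : a < Ns.length) (hb : b < Ms.length),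
        ((a : Int) < (i : Int) ∨ j < (b : Int)) → Ns[a] + Ms[b] ≤ s → Ns[a] + Ms[b] ≤ best) →
    -1 ≤ tpLoop Ns Ms s i j best ∧
    (tpLoop Ns Ms s i j best = -1 ∨
      ∃ n ∈ Ns, ∃ m ∈ Ms, n + m = tpLoop Ns Ms s i j best ∧ tpLoop Ns Ms s i j best ≤ s) ∧
    (∀ n ∈ Ns, ∀ m ∈ Ms, n + m ≤ s → n + m ≤ tpLoop Ns Ms s i j best) := by
  intro i j best
  induction i, j, best using tpLoop.induct Ns Ms s with
  | case1 i j best h t hts ih =>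
    intro hj h1 h2 h3
    have hi : i < Ns.length := h.1
    have hj0 : 0 ≤ j := h.2
    have hjn : j.toNat < Ms.length := by omega
    have hjc : j = ((j.toNat : Nat) : Int) := by omega
    have hexpr : Ns.getD i 0 + (PySem.List.pyGet? Ms j).getD 0 = Ns[i] + Ms[j.toNat] := by
      have hg1 : Ns.getD i 0 = Ns[i] := by
        simp [List.getD_eq_getElem?_getD, List.getElem?_eq_getElem hi]
      have hg2 : (PySem.List.pyGet? Ms j).getD 0 = Ms[j.toNat] := by
        conv_lhs => rw [hjc]
        rw [PySem.List.pyGet?_natCast]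
        simp [List.getElem?_eq_getElem hjn]
      rw [hg1, hg2]
    have hts' : Ns.getD i 0 + (PySem.List.pyGet? Ms j).getD 0 ≤ s := hts
    have hE : Ns[i] + Ms[j.toNat] ≤ s := by rw [← hexpr]; exact hts'
    rw [tpLoop]
    simp only [dif_pos h]
    rw [if_pos hts', hexpr]
    have h2' : max best (Ns[i] + Ms[j.toNat]) = -1 ∨
        ∃ n ∈ Ns, ∃ m ∈ Ms, n + m = max best (Ns[i] + Ms[j.toNat]) ∧
          max best (Ns[i] + Ms[j.toNat]) ≤ s := by
      rcases max_choice best (Ns[i] + Ms[j.toNat]) with hm | hm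
      · rw [hm]
        exact h2
      · rw [hm]
        exact Or.inr ⟨Ns[i], List.getElem_mem hi, Ms[j.toNat], List.getElem_mem hjn, rfl, hE⟩
    have h3' : ∀ (a b : Nat) (ha : a < Ns.length) (hb : b < Ms.length),
        ((a : Int) < ((i + 1 : Nat) : Int) ∨ j < (b : Int)) → Ns[a] + Ms[b] ≤ s →
        Ns[a] + Ms[b] ≤ max best (Ns[i] + Ms[j.toNat]) := by
      intro a b ha hb hab hfit
      rcases hab with hai | hjb
      · by_cases hlt : (a : Int) < (i : Int)
        · exact le_trans (h3 a b ha hb (Or.inl hlt) hfit) (le_max_left _ _)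
        · by_cases hjb2 : j < (b : Int)
          · exact le_trans (h3 a b ha hb (Or.inr hjb2) hfit) (le_max_left _ _)
          · have hae : a = i := by omega
            subst hae
            have hble : Ms[b] ≤ Ms[j.toNat] := by
              rcases Nat.lt_or_ge b j.toNat with hblt | hbge
              · exact List.pairwise_iff_getElem.mp hMs b j.toNat hb hjn hblt
              · have hbe : b = j.toNat := by omega
                subst hbe
                exact le_rfl
            exact le_trans (add_le_add le_rfl hble) (le_max_right _ _)
      · exact le_trans (h3 a b ha hb (Or.inr hjb) hfit) (le_max_left _ _)
    have ht : t = Ns[i] + Ms[j.toNat] := hexpr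
    rw [← ht] at h2' h3'
    have hres := ih hj (le_trans h1 (le_max_left _ _)) h2' h3'
    rw [ht] at hres
    exact hres
  | case2 i j best h t hts ih =>
    intro hj h1 h2 h3
    have hi : i < Ns.length := h.1
    have hj0 : 0 ≤ j := h.2
    have hjn : j.toNat < Ms.length := by omega
    have hjc : j = ((j.toNat : Nat) : Int) := by omega
    have hexpr : Ns.getD i 0 + (PySem.List.pyGet? Ms j).getD 0 = Ns[i] + Ms[j.toNat] := by
      have hg1 : Ns.getD i 0 = Ns[i] := by
        simp [List.getD_eq_getElem?_getD, List.getElem?_eq_getElem hi]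
      have hg2 : (PySem.List.pyGet? Ms j).getD 0 = Ms[j.toNat] := by
        conv_lhs => rw [hjc]
        rw [PySem.List.pyGet?_natCast]
        simp [List.getElem?_eq_getElem hjn]
      rw [hg1, hg2]
    have hts' : ¬ Ns.getD i 0 + (PySem.List.pyGet? Ms j).getD 0 ≤ s := hts
    have hE : ¬ Ns[i] + Ms[j.toNat] ≤ s := by rw [← hexpr]; exact hts'
    rw [tpLoop]
    simp only [dif_pos h]
    rw [if_neg hts']
    apply ih (by omega) h1 h2
    intro a b ha hb hab hfit
    rcases hab with hai | hjb
    · exact h3 a b ha hb (Or.inl hai) hfit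
    · by_cases hbj : j < (b : Int)
      · exact h3 a b ha hb (Or.inr hbj) hfit
      · by_cases hai2 : (a : Int) < (i : Int)
        · exact h3 a b ha hb (Or.inl hai2) hfit
        · exfalso
          have hbe : b = j.toNat := by omega
          subst hbe
          have hia : i ≤ a := by omega
          have hna : Ns[i] ≤ Ns[a] := by
            rcases Nat.lt_or_ge i a with hlt | hge
            · exact List.pairwise_iff_getElem.mp hNs i a hi ha hlt
            · have hie : i = a := by omega
              subst hie
              exact le_rfl
          have hchain : Ns[i] + Ms[j.toNat] ≤ Ns[a] + Ms[j.toNat] := add_le_add hna le_rfl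
          exact hE (le_trans hchain hfit)
  | case3 i j best h =>
    intro hj h1 h2 h3
    rw [tpLoop]
    simp only [dif_neg h]
    refine ⟨h1, h2, ?_⟩
    intro n hn m hm hfit
    obtain ⟨a, ha, rfl⟩ := List.mem_iff_getElem.mp hn
    obtain ⟨b, hb, rfl⟩ := List.mem_iff_getElem.mp hm
    rcases not_and_or.mp h with hia | hjo
    · exact h3 a b ha hb (Or.inl (by omega)) hfit
    · exact h3 a b ha hb (Or.inr (by omega)) hfit

theorem alt_good (N M : List Int) (s : Int) : GoodMax N M s (electric_alt N M s) := by
  have hNp : List.Pairwise (· ≤ ·) (PySem.List.sorted N (fun x => x)) := by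
    simpa using PySem.List.sorted_pairwise N (fun x => x)
  have hMp : List.Pairwise (· ≤ ·) (PySem.List.sorted M (fun x => x)) := by
    simpa using PySem.List.sorted_pairwise M (fun x => x)
  obtain ⟨h1, h2, h3⟩ := tpLoop_good (PySem.List.sorted N (fun x => x))
    (PySem.List.sorted M (fun x => x)) s hNp hMp 0
    (((PySem.List.sorted M (fun x => x)).length : Int) - 1) (-1)
    (by omega) le_rfl (Or.inl rfl)
    (by intro a b ha hb hab _; exfalso; omega)
  refine ⟨h1, ?_, ?_⟩
  · rcases h2 with h2 | ⟨n, hn, m, hm, he, hle⟩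
    · exact Or.inl h2
    · exact Or.inr ⟨n, (PySem.List.mem_sorted _ _ _ _).mp hn, m,
        (PySem.List.mem_sorted _ _ _ _).mp hm, he, hle⟩
  · intro n hn m hm hnm
    exact h3 n ((PySem.List.mem_sorted _ _ _ _).mpr hn) m ((PySem.List.mem_sorted _ _ _ _).mpr hm) hnm

theorem loop_spec (Ns : List Int) (s : Int) :
    ∀ (ms : List Int) (r : Int), List.Pairwise (· ≤ ·) Ns → List.Pairwise (· ≤ ·) ms →
    ∀ res, res = electricLoop Ns s ms r →
    r ≤ res ∧ (res = r ∨ ∃ n ∈ Ns, ∃ m ∈ ms, n + m = res ∧ res ≤ s) ∧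
    (∀ n ∈ Ns, ∀ m ∈ ms, n + m ≤ s → n + m ≤ res) := by
  intro ms
  induction ms with
  | nil => intro r _ _ res hres; subst hres; exact ⟨le_rfl, Or.inl rfl, by simp⟩
  | cons mi rest ih =>
    intro r hNs hms res hresdef
    have hrest : List.Pairwise (· ≤ ·) rest := (List.pairwise_cons.mp hms).2
    have hhead : ∀ m ∈ rest, mi ≤ m := (List.pairwise_cons.mp hms).1
    obtain ⟨hle, hmid, hgt⟩ := PySem.List.bisectRight_spec Ns (s - mi) hNs
    by_cases h0 : PySem.List.bisectRight Ns (s - mi) = 0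
    · have hres : res = r := by simp [hresdef, electricLoop, h0]
      have hall : ∀ n ∈ Ns, s - mi < n := by
        intro n hn
        obtain ⟨j, hj, rfl⟩ := List.mem_iff_getElem.mp hn
        exact hgt j hj (by omega)
      refine ⟨le_of_eq hres.symm, Or.inl hres, ?_⟩
      intro n hn m hm hnm
      exfalso
      have hin : s - mi < n := hall n hn
      rcases List.mem_cons.mp hm with rfl | hm
      · omega
      · have := hhead m hm; omega
    · set loc := PySem.List.bisectRight Ns (s - mi) with hloc
      have hloc1 : 1 ≤ loc := Nat.one_le_iff_ne_zero.mpr h0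
      have hidx : loc - 1 < Ns.length := by omega
      have hcast : (loc : Int) - 1 = ((loc - 1 : Nat) : Int) := by omega
      have hget : (PySem.List.pyGet? Ns ((loc : Int) - 1)).getD 0 = Ns[loc - 1] := by
        rw [hcast, PySem.List.pyGet?_natCast]
        simp [List.getElem?_eq_getElem hidx]
      set k := (PySem.List.pyGet? Ns ((loc : Int) - 1)).getD 0 with hk
      have hkmem : k ∈ Ns := by rw [hget]; exact List.getElem_mem hidx
      have hkle : k ≤ s - mi := by rw [hget]; exact hmid (loc - 1) hidx (by omega)
      have hkmax : ∀ n ∈ Ns, n ≤ s - mi → n ≤ k := by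
        intro n hn hns
        obtain ⟨j, hj, rfl⟩ := List.mem_iff_getElem.mp hn
        by_cases hjl : j < loc
        · rcases Nat.lt_or_ge j (loc - 1) with hlt | hge
          · rw [hget]
            exact List.pairwise_iff_getElem.mp hNs j (loc - 1) hj hidx hlt
          · have hje : j = loc - 1 := by omega
            subst hje
            exact le_of_eq hget.symm
        · exact absurd hns (not_le.mpr (hgt j hj (by omega)))
      have hres : res = electricLoop Ns s rest (max r (mi + k)) := by
        simp only [hresdef, electricLoop]
        rw [if_neg h0]
      obtain ⟨h1, h2, h3⟩ := ih (max r (mi + k)) hNs hrest _ rfl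
      rw [← hres] at h1 h2 h3
      refine ⟨le_trans (le_max_left _ _) h1, ?_, ?_⟩
      · rcases h2 with h2 | ⟨n, hn, m, hm, he, hsle⟩
        · rcases max_choice r (mi + k) with hm | hm
          · exact Or.inl (by rw [h2, hm])
          · exact Or.inr ⟨k, hkmem, mi, by simp, by rw [h2, hm]; ring, by rw [h2, hm]; omega⟩
        · exact Or.inr ⟨n, hn, m, by simp [hm], he, hsle⟩
      · intro n hn m hm hnm
        rcases List.mem_cons.mp hm with heq | hm
        · have hnk : n ≤ k := hkmax n hn (by rw [heq] at hnm; omega)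
          have hle2 : n + m ≤ mi + k := by rw [heq]; omega
          exact le_trans hle2 (le_trans (le_max_right r (mi + k)) h1)
        · exact h3 n hn m hm hnm

theorem a_good (N M : List Int) (s : Int) : GoodMax N M s (electric N M s) := by
  have hNp : List.Pairwise (· ≤ ·) (PySem.List.sorted N (fun x => x)) := by
    simpa using PySem.List.sorted_pairwise N (fun x => x)
  have hMp : List.Pairwise (· ≤ ·) (PySem.List.sorted M (fun x => x)) := by
    simpa using PySem.List.sorted_pairwise M (fun x => x)
  obtain ⟨h1, h2, h3⟩ := loop_spec (PySem.List.sorted N (fun x => x)) s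
    (PySem.List.sorted M (fun x => x)) (-1) hNp hMp _ rfl
  refine ⟨h1, ?_, ?_⟩
  · rcases h2 with h2 | ⟨n, hn, m, hm, he, hle⟩
    · exact Or.inl h2
    · exact Or.inr ⟨n, (PySem.List.mem_sorted _ _ _ _).mp hn, m, (PySem.List.mem_sorted _ _ _ _).mp hm, he, hle⟩
  · intro n hn m hm hnm
    exact h3 n ((PySem.List.mem_sorted _ _ _ _).mpr hn) m ((PySem.List.mem_sorted _ _ _ _).mpr hm) hnm

-- ===== VERDICT (by name: the statement is the Claim_ definition above) =====
theorem electric_spec : Claim_equal_electric := by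
  intro N M s _
  unfold Spec_electric
  exact goodMax_unique (a_good N M s) (alt_good N M s)
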